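-- pv_equiv track=rewrite | github.com/ForecastHealth/ncd-diabetes | scripts/determine_list_of_countries.py | split_countries
-- ===== SOURCE A (Python) =====
-- from typing import Dict, List, Tuple
--
-- def split_countries(countries: Dict[str, Dict[str, str]], statuses: Dict[str, str]) -> Tuple[List[Dict[str, str]], List[Dict[str, str]]]:
--     successful = []
--     unsuccessful = []
--     for iso3, status in statuses.items():
--         if iso3 in countries:
--             if status == 'Success':
--                 successful.append(countries[iso3])
--             else:
--                 unsuccessful.append(countries[iso3])
--
--     # Sort the lists alphabetically by country name
--     successful.sort(key=lambda x: x['name'])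
--     unsuccessful.sort(key=lambda x: x['name'])
--
--     return successful, unsuccessful
-- ===== SOURCE B (Python) =====
-- def split_countries(countries, statuses):
--     # one combined filtered list, ONE stable sort by name, then comprehension partition
--     combined = [(status, countries[iso3]) for iso3, status in statuses.items() if iso3 in countries]
--     ordered = sorted(combined, key=lambda t: t[1]['name'])
--     successful = [country for status, country in ordered if status == 'Success']
--     unsuccessful = [country for status, country in ordered if status != 'Success']
--     return successful, unsuccessful
-- ===== Notes on version B (the rewrite author's own statement) =====
-- stated objective: alternative
-- what changed: B builds one combined (status, country) list, stable-sorts that single list once by country name, and extracts the two result lists by comprehension filters over the sorted list, instead of A's append-to-two-lists loop followed by two separate sorts; Pre_ excludes association-list encodings with duplicate dict keys (not representable as Python dict inputs) and inputs where a selected country lacks a 'name' key, on which both A and B raise KeyError.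
import Mathlib
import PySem

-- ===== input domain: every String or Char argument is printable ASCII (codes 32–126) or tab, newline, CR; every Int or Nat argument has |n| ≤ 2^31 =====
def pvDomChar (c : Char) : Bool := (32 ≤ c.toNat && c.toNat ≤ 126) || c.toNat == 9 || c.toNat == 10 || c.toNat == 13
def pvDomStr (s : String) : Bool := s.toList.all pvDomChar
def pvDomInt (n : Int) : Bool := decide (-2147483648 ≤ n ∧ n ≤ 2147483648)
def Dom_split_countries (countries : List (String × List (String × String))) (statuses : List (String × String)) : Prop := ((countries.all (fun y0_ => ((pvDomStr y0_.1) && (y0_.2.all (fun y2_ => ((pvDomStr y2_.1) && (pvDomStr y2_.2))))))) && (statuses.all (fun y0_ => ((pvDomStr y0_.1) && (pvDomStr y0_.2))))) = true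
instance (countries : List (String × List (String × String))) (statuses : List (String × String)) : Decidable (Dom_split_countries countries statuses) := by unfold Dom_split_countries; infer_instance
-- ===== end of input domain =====

-- One honest line: B builds ONE combined (status, country) list, stable-sorts it once by country
-- name and extracts both results by comprehension filters, instead of A's append-to-two-lists loop
-- followed by two separate sorts (objective: alternative decomposition; no argument is mutated).

-- ===== PORT A =====
-- dict lookup countries[k] / 'k in countries': first match in the association list
def pvLookup (countries : List (String × List (String × String))) (k : String) : Option (List (String × String)) :=
  (countries.find? (fun q => q.1 == k)).map (fun q => q.2)

-- x['name'] used as sort key; total with default "" — Pre_ guarantees the key is present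
def pvName (c : List (String × String)) : String :=
  ((c.find? (fun q => q.1 == "name")).map (fun q => q.2)).getD ""

def split_countries (countries : List (String × List (String × String))) (statuses : List (String × String)) : (List (List (String × String))) × (List (List (String × String))) :=
  let r := statuses.foldl (fun acc p =>
      match pvLookup countries p.1 with
      | some cd => if p.2 == "Success" then (acc.1 ++ [cd], acc.2) else (acc.1, acc.2 ++ [cd])
      | none => acc) ([], [])
  (PySem.List.sorted r.1 pvName false, PySem.List.sorted r.2 pvName false)

-- ===== PORT B =====
def split_countries_alt (countries : List (String × List (String × String))) (statuses : List (String × String)) : (List (List (String × String))) × (List (List (String × String))) :=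
  let combined := statuses.filterMap (fun p => (countries.find? (fun q => q.1 == p.1)).map (fun q => (p.2, q.2)))
  let ordered := PySem.List.sorted combined (fun t => pvName t.2) false
  ((ordered.filter (fun t => t.1 == "Success")).map Prod.snd,
   (ordered.filter (fun t => !(t.1 == "Success"))).map Prod.snd)

-- ===== PRECONDITION & SPEC =====
-- Pre_ excludes (a) association lists with duplicate keys, which no Python dict argument can
-- represent (lookup/iteration order there is an artefact of the encoding), and (b) inputs where a
-- country selected by some status lacks a 'name' key — there BOTH Pythons raise KeyError in the sort.
def Pre_split_countries (countries : List (String × List (String × String))) (statuses : List (String × String)) : Prop :=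
  (countries.map Prod.fst).Nodup ∧ (statuses.map Prod.fst).Nodup ∧
  ∀ p ∈ statuses, ∀ q ∈ countries, q.1 = p.1 → "name" ∈ q.2.map Prod.fst
instance (countries : List (String × List (String × String))) (statuses : List (String × String)) : Decidable (Pre_split_countries countries statuses) := by unfold Pre_split_countries; infer_instance

def pvWitness_split_countries : (List (String × List (String × String))) × (List (String × String)) :=
  ([("USA", [("name", "United States")]), ("FRA", [("name", "France")])],
   [("USA", "Success"), ("FRA", "Failed"), ("XYZ", "Success")])

def Spec_split_countries (countries : List (String × List (String × String))) (statuses : List (String × String)) (out : (List (List (String × String))) × (List (List (String × String)))) : Prop := out = split_countries_alt countries statuses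
instance (countries : List (String × List (String × String))) (statuses : List (String × String)) (out : (List (List (String × String))) × (List (List (String × String)))) : Decidable (Spec_split_countries countries statuses out) := by unfold Spec_split_countries; infer_instance

-- ===== CLAIM (what is proved, stated in full; the proofs are below) =====
def Claim_equal_split_countries : Prop := ∀ (countries : List (String × List (String × String))) (statuses : List (String × String)), Dom_split_countries countries statuses → Pre_split_countries countries statuses → Spec_split_countries countries statuses (split_countries countries statuses)

-- ===== LEMMAS AND PROOFS =====

-- one unfolding step of insertBy on a cons
lemma pv_insertBy_cons {α : Type} (before : α → α → Bool) (x y : α) (ys : List α) :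
    PySem.List.insertBy before x (y :: ys) =
      if before x y then x :: y :: ys else y :: PySem.List.insertBy before x ys := rfl

-- x goes to the very front when it sorts strictly before every element
lemma pv_insertBy_front {α : Type} (before : α → α → Bool) (x : α) (l : List α)
    (h : ∀ z ∈ l, before x z = true) :
    PySem.List.insertBy before x l = x :: l := by
  cases l with
  | nil => rfl
  | cons y ys => rw [pv_insertBy_cons, if_pos (h y List.mem_cons_self)]

-- filtering commutes with a single stable insertion step into a key-sorted list
lemma pv_filter_insertBy {α : Type} (key : α → String) (p : α → Bool) (x : α) :
    ∀ ys : List α, ys.Pairwise (fun a b => key a ≤ key b) →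
    (PySem.List.insertBy (fun a b => decide (key a < key b)) x ys).filter p =
      if p x then PySem.List.insertBy (fun a b => decide (key a < key b)) x (ys.filter p)
      else ys.filter p := by
  intro ys
  induction ys with
  | nil =>
    intro _
    cases hx : p x <;> simp [PySem.List.insertBy, List.filter, hx]
  | cons y ys ih =>
    intro hpw
    have hhead : ∀ z ∈ ys, key y ≤ key z := (List.pairwise_cons.mp hpw).1
    have hys : ys.Pairwise (fun a b => key a ≤ key b) := (List.pairwise_cons.mp hpw).2
    by_cases hb : key x < key y
    · -- x is inserted right here, before y
      rw [pv_insertBy_cons, if_pos (decide_eq_true hb)]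
      by_cases hx : p x = true
      · rw [if_pos hx, List.filter_cons_of_pos hx]
        refine (pv_insertBy_front _ x _ ?_).symm
        intro z hz
        rcases List.mem_cons.mp (List.mem_of_mem_filter hz) with rfl | hzys
        · exact decide_eq_true hb
        · exact decide_eq_true (lt_of_lt_of_le hb (hhead z hzys))
      · rw [if_neg hx, List.filter_cons_of_neg hx]
    · -- x moves past y
      rw [pv_insertBy_cons, if_neg (by simpa using hb)]
      by_cases hy : p y = true
      · rw [List.filter_cons_of_pos hy, List.filter_cons_of_pos hy, ih hys]
        by_cases hx : p x = true
        · rw [if_pos hx, if_pos hx, pv_insertBy_cons, if_neg (by simpa using hb)]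
        · rw [if_neg hx, if_neg hx]
      · rw [List.filter_cons_of_neg (by simpa using hy), List.filter_cons_of_neg (by simpa using hy),
            ih hys]

-- filtering commutes with the whole insertion-sort fold
lemma pv_filter_foldl {α : Type} (key : α → String) (p : α → Bool) :
    ∀ (l : List α) (acc : List α), acc.Pairwise (fun a b => key a ≤ key b) →
    (l.foldl (fun a x => PySem.List.insertBy (fun a b => decide (key a < key b)) x a) acc).filter p =
      (l.filter p).foldl (fun a x => PySem.List.insertBy (fun a b => decide (key a < key b)) x a)
        (acc.filter p) := by
  intro l
  induction l with
  | nil => intro acc _; simp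
  | cons x l ih =>
    intro acc hacc
    have hstep := PySem.List.insertBy_pairwise_le key x acc hacc
    rw [List.foldl_cons, ih _ hstep, pv_filter_insertBy key p x acc hacc]
    by_cases hx : p x = true
    · rw [if_pos hx, List.filter_cons_of_pos hx, List.foldl_cons]
    · rw [if_neg hx, List.filter_cons_of_neg hx]

-- stable sort commutes with filter
lemma pv_sorted_filter {α : Type} (key : α → String) (p : α → Bool) (l : List α) :
    (PySem.List.sorted l key false).filter p = PySem.List.sorted (l.filter p) key false := by
  rw [PySem.List.sorted_eq_foldl_insertBy, PySem.List.sorted_eq_foldl_insertBy]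
  simpa using pv_filter_foldl key p l [] List.Pairwise.nil

-- mapping through a projection commutes with one insertion step on the composed key
lemma pv_map_insertBy {α β : Type} (f : α → β) (key : β → String) (x : α) :
    ∀ ys : List α,
    (PySem.List.insertBy (fun a b => decide (key (f a) < key (f b))) x ys).map f =
      PySem.List.insertBy (fun a b => decide (key a < key b)) (f x) (ys.map f) := by
  intro ys
  induction ys with
  | nil => simp [PySem.List.insertBy]
  | cons y ys ih =>
    rw [List.map_cons, pv_insertBy_cons, pv_insertBy_cons]
    by_cases hb : key (f x) < key (f y)
    · rw [if_pos (decide_eq_true hb), if_pos (decide_eq_true hb), List.map_cons, List.map_cons]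
    · rw [if_neg (by simpa using hb), if_neg (by simpa using hb), List.map_cons, ih]

-- … and with the whole sort fold
lemma pv_map_foldl {α β : Type} (f : α → β) (key : β → String) :
    ∀ (l : List α) (acc : List α),
    (l.foldl (fun a x => PySem.List.insertBy (fun a b => decide (key (f a) < key (f b))) x a) acc).map f =
      (l.map f).foldl (fun a x => PySem.List.insertBy (fun a b => decide (key a < key b)) x a)
        (acc.map f) := by
  intro l
  induction l with
  | nil => intro acc; simp
  | cons x l ih => intro acc; rw [List.foldl_cons, ih, pv_map_insertBy f key x acc]; simp

lemma pv_sorted_map {α β : Type} (f : α → β) (key : β → String) (l : List α) :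
    (PySem.List.sorted l (fun a => key (f a)) false).map f =
      PySem.List.sorted (l.map f) key false := by
  rw [PySem.List.sorted_eq_foldl_insertBy, PySem.List.sorted_eq_foldl_insertBy]
  simpa using pv_map_foldl f key l []

-- the combined filtered list both programs are (implicitly or explicitly) built from
def pvComb (countries : List (String × List (String × String))) (statuses : List (String × String)) :
    List (String × List (String × String)) :=
  statuses.filterMap (fun p => (pvLookup countries p.1).map (fun cd => (p.2, cd)))

-- A's loop builds exactly the two projections of the combined list
lemma pv_A_fold (c : List (String × List (String × String))) :
    ∀ (l : List (String × String)) (acc : List (List (String × String)) × List (List (String × String))),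
    l.foldl (fun acc p =>
        match pvLookup c p.1 with
        | some cd => if p.2 == "Success" then (acc.1 ++ [cd], acc.2) else (acc.1, acc.2 ++ [cd])
        | none => acc) acc
    = (acc.1 ++ ((pvComb c l).filter (fun t => t.1 == "Success")).map Prod.snd,
       acc.2 ++ ((pvComb c l).filter (fun t => !(t.1 == "Success"))).map Prod.snd) := by
  intro l
  induction l with
  | nil => intro acc; simp [pvComb]
  | cons p l ih =>
    intro acc
    rw [List.foldl_cons]
    cases h : pvLookup c p.1 with
    | none => rw [ih]; simp [pvComb, h]
    | some cd =>
      by_cases hp : (p.2 == "Success") = true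
      · simp only [hp, if_true]
        rw [ih]
        simp [pvComb, h, hp]
      · simp only [hp]
        rw [ih]
        simp [pvComb, h, hp]

-- B's inline lookup builds the same combined list
lemma pv_B_comb (c : List (String × List (String × String))) (s : List (String × String)) :
    s.filterMap (fun p => (c.find? (fun q => q.1 == p.1)).map (fun q => (p.2, q.2)))
      = pvComb c s := by
  unfold pvComb pvLookup
  simp only [Option.map_map]
  rfl

-- ===== VERDICT (by name: the statement is the Claim_ definition above) =====
theorem split_countries_spec : Claim_equal_split_countries := by
  intro countries statuses _ _
  unfold Spec_split_countries split_countries split_countries_alt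
  rw [pv_A_fold countries statuses ([], [])]
  simp only [List.nil_append]
  rw [pv_B_comb,
      pv_sorted_filter (fun t => pvName t.2) (fun t => t.1 == "Success") (pvComb countries statuses),
      pv_sorted_filter (fun t => pvName t.2) (fun t => !(t.1 == "Success")) (pvComb countries statuses),
      pv_sorted_map Prod.snd pvName, pv_sorted_map Prod.snd pvName]
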